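-- pv_equiv track=rewrite | github.com/addepallijayanth/Smart-Interviews-Basic | Max Altitude.py | highest_altitude
-- ===== SOURCE A (Python) =====
-- def highest_altitude(N, arr):
--     max_altitude = 0  # Initialize the maximum altitude to 0
--     current_altitude = 0  # Initialize the current altitude to 0
--
--     for i in range(N):
--         current_altitude += arr[i]  # Update the current altitude
--
--         # Update the maximum altitude if the current altitude is higher
--         if current_altitude > max_altitude:
--             max_altitude = current_altitude
--
--     return max_altitude
-- ===== SOURCE B (Python) =====
-- def highest_altitude(N, arr):
--     # Backward right-fold: best suffix answer satisfies best = max(0, x + best),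
--     # so the max prefix-sum altitude falls out of one reversed pass with no running sum.
--     best = 0
--     for x in reversed(arr[:max(N, 0)]):
--         best = max(0, x + best)
--     return best
-- ===== Notes on version B (the rewrite author's own statement) =====
-- stated objective: alternative
-- what changed: Replaces A's forward scan that maintains a running prefix sum and a running maximum with a backward right-fold over the reversed slice using the recurrence best = max(0, x + best), which never materializes any prefix sum.
-- outside the precondition, e.g. on highest_altitude(3, [1, 2]): A raises IndexError, B returns 3
import Mathlib
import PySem

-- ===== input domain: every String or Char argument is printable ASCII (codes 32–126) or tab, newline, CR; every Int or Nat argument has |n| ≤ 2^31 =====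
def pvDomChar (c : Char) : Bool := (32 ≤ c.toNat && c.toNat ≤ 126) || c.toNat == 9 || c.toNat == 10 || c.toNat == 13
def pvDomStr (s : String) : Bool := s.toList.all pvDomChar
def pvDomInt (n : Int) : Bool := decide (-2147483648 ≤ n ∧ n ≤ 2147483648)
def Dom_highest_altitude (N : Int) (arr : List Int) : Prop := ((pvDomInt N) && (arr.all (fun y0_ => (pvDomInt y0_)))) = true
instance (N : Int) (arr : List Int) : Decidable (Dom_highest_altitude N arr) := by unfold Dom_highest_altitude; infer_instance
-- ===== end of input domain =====

-- B replaces A's forward running-sum-and-max scan with a backward right-fold best = max(0, x + best); same cost, different recurrence.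

-- ===== PORT A =====
-- for i in range(N): current += arr[i]; if current > max: max = current
def highest_altitude (N : Int) (arr : List Int) : Int :=
  ((PySem.List.pyRange 0 N 1).foldl
    (fun (st : Int × Int) i =>
      let current := st.2 + PySem.List.pyGetD arr i 0
      (if current > st.1 then current else st.1, current))
    (0, 0)).1

-- ===== PORT B =====
-- best = 0; for x in reversed(arr[:max(N, 0)]): best = max(0, x + best)
def highest_altitude_alt (N : Int) (arr : List Int) : Int :=
  (PySem.List.slice arr none (some (max N 0))).reverse.foldl
    (fun best x => max 0 (x + best)) 0

-- ===== PRECONDITION & SPEC =====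
-- Pre_ excludes exactly N > len(arr), where A raises IndexError.
def Pre_highest_altitude (N : Int) (arr : List Int) : Prop :=
  N ≤ (arr.length : Int)
instance (N : Int) (arr : List Int) : Decidable (Pre_highest_altitude N arr) := by
  unfold Pre_highest_altitude; infer_instance
def pvWitness_highest_altitude : Int × List Int := (3, [2, -5, 4, 1])

def Spec_highest_altitude (N : Int) (arr : List Int) (out : Int) : Prop := out = highest_altitude_alt N arr
instance (N : Int) (arr : List Int) (out : Int) : Decidable (Spec_highest_altitude N arr out) := by unfold Spec_highest_altitude; infer_instance

-- ===== CLAIM (what is proved, stated in full; the proofs are below) =====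
def Claim_equal_highest_altitude : Prop := ∀ (N : Int) (arr : List Int), Dom_highest_altitude N arr → Pre_highest_altitude N arr → Spec_highest_altitude N arr (highest_altitude N arr)

-- ===== LEMMAS AND PROOFS =====

-- B's right-fold value is nonnegative.
lemma foldr_step_nonneg (xs : List Int) :
    0 ≤ xs.foldr (fun x b => max 0 (x + b)) 0 := by
  induction xs with
  | nil => simp
  | cons x xs ih => simp only [List.foldr]; exact le_max_left _ _

-- A's loop over the element list equals c plus B's right-fold, maxed with m (for c ≤ m).
lemma loopA_eq_foldr (xs : List Int) (m c : Int) (h : c ≤ m) :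
    (xs.foldl
      (fun (st : Int × Int) x =>
        let current := st.2 + x
        (if current > st.1 then current else st.1, current)) (m, c)).1
    = max m (c + xs.foldr (fun x b => max 0 (x + b)) 0) := by
  induction xs generalizing m c with
  | nil => simp; omega
  | cons x xs ih =>
      simp only [List.foldl, List.foldr]
      have hnn := foldr_step_nonneg xs
      rw [ih _ _ (by split_ifs <;> omega)]
      split_ifs <;> omega

lemma map_pyGetD_range_take (arr : List Int) (n : Nat) (h : n ≤ arr.length) :
    (List.range n).map (fun k => arr.getD k 0) = arr.take n := by
  apply List.ext_getElem
  · simp [Nat.min_eq_left h]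
  · intro i h1 h2
    simp only [List.getElem_map, List.getElem_range, List.getElem_take]
    have : i < arr.length := by simp at h1; omega
    simp [List.getD_eq_getElem?_getD, List.getElem?_eq_getElem this]

-- ===== VERDICT (by name: the statement is the Claim_ definition above) =====
theorem highest_altitude_spec : Claim_equal_highest_altitude := by
  intro N arr _ hlen
  unfold Pre_highest_altitude at hlen
  unfold Spec_highest_altitude highest_altitude highest_altitude_alt
  rw [PySem.List.slice_to arr (le_max_right N 0)]
  have hMN : (max N 0).toNat = N.toNat := by omega
  -- turn the pyRange/pyGetD loop into a foldl over arr.take N.toNat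
  have hrange : (PySem.List.pyRange 0 N 1).map (fun j => PySem.List.pyGetD arr j 0)
      = arr.take N.toNat := by
    rw [PySem.List.pyRange_one]
    have : ((N - 0).toNat) = N.toNat := by omega
    rw [this, List.map_map]
    have : ((fun j => PySem.List.pyGetD arr j 0) ∘ fun k : Nat => (0 : Int) + k)
        = fun k : Nat => arr.getD k 0 := by
      funext k
      simp [PySem.List.pyGetD_natCast]
    rw [this]
    exact map_pyGetD_range_take arr N.toNat (by omega)
  have hA := loopA_eq_foldr ((PySem.List.pyRange 0 N 1).map
      (fun j => PySem.List.pyGetD arr j 0)) 0 0 le_rfl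
  rw [List.foldl_map] at hA
  simp only at hA ⊢
  rw [hA, hrange, hMN, List.foldl_reverse]
  have hnn := foldr_step_nonneg (arr.take N.toNat)
  omega
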